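-- pv_equiv track=rewrite | github.com/EdsonEddy/scsc | notebooks/datasets/medium/776506.py | imprimir_factores
-- ===== SOURCE A (Python) =====
-- def imprimir_factores(n, factores):
--     contador = {}
--     for f in factores:
--         if f in contador:
--             contador[f] += 1
--         else:
--             contador[f] = 1
--
--     resultado = []
--     for factor, exp in sorted(contador.items()):
--         if exp > 1:
--             resultado.append(f"{factor}^{exp}")
--         else:
--             resultado.append(str(factor))
--
--     return f"{n} = {'*'.join(resultado)}"
-- ===== SOURCE B (Python) =====
-- def imprimir_factores(n, factores):
--     orden = sorted(factores)
--     runs = []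
--     i = 0
--     while i < len(orden):
--         j = i
--         while j < len(orden) and orden[j] == orden[i]:
--             j += 1
--         runs.append((orden[i], j - i))
--         i = j
--     pieces = [f"{f}^{c}" if c > 1 else str(f) for f, c in runs]
--     return f"{n} = {'*'.join(pieces)}"
-- ===== Notes on version B (the rewrite author's own statement) =====
-- stated objective: alternative
-- what changed: Replaces the dict counter plus sorted(items) with sort-first and a single run-length scan over the sorted list (no dictionary at all).
import Mathlib
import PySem

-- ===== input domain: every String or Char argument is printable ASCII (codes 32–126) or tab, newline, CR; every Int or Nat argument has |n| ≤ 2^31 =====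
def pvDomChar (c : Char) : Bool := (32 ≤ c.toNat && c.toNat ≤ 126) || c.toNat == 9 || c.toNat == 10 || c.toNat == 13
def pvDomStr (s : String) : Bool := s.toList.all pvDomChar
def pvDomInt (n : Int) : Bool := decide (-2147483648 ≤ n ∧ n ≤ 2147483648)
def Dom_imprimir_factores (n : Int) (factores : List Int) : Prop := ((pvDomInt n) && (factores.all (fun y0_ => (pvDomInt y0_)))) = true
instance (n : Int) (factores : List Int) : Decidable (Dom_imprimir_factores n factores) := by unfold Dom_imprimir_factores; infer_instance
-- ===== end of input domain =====

-- B replaces A's dict counter + sorted(items) with sort-first and a single run-length scan (no dictionary); same cost, different algorithm.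


-- ===== PORT A =====
-- contador = {}; for f in factores: if f in contador: contador[f] += 1 else: contador[f] = 1
-- resultado = [...] over sorted(contador.items()) (tuple sort = PySem.List.sorted2 on fst, snd)
def imprimir_factores (n : Int) (factores : List Int) : String :=
  let contador := factores.foldl
    (fun d f => if d.contains f then d.modify f 0 (· + 1) else d.insert f (1 : Int))
    PySem.Dict.empty
  let resultado := (PySem.List.sorted2 contador.items (fun p => p.1) (fun p => p.2)).foldl
    (fun acc p =>
      if p.2 > 1 then acc ++ [PySem.Int.toStr p.1 ++ "^" ++ PySem.Int.toStr p.2]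
      else acc ++ [PySem.Int.toStr p.1]) []
  PySem.Int.toStr n ++ " = " ++ PySem.Str.join "*" resultado

-- ===== PORT B =====
-- the two nested while loops of Source B: each outer step takes one maximal run of equal
-- elements off the front of the (sorted) list and records (value, run length)
def pvGroup : List Int → List (Int × Int)
  | [] => []
  | x :: xs =>
      (x, 1 + ((xs.takeWhile (fun y => y == x)).length : Int)) ::
        pvGroup (xs.dropWhile (fun y => y == x))
termination_by l => l.length
decreasing_by
  simp only [List.length_cons]
  exact Nat.lt_succ_of_le (List.length_dropWhile_le _ _)

def imprimir_factores_alt (n : Int) (factores : List Int) : String :=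
  let orden := PySem.List.sorted factores (fun x => x)
  let pieces := (pvGroup orden).map (fun p =>
    if p.2 > 1 then PySem.Int.toStr p.1 ++ "^" ++ PySem.Int.toStr p.2
    else PySem.Int.toStr p.1)
  PySem.Int.toStr n ++ " = " ++ PySem.Str.join "*" pieces

-- ===== PRECONDITION & SPEC =====
def Spec_imprimir_factores (n : Int) (factores : List Int) (out : String) : Prop := out = imprimir_factores_alt n factores
instance (n : Int) (factores : List Int) (out : String) : Decidable (Spec_imprimir_factores n factores out) := by unfold Spec_imprimir_factores; infer_instance

-- ===== CLAIM (what is proved, stated in full; the proofs are below) =====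
def Claim_equal_imprimir_factores : Prop := ∀ (n : Int) (factores : List Int), Dom_imprimir_factores n factores → Spec_imprimir_factores n factores (imprimir_factores n factores)

-- ===== LEMMAS AND PROOFS =====

-- insertBy only looks at comparisons of x against members of ys
theorem insertBy_congr_mem {α : Type} (f g : α → α → Bool) (x : α) (ys : List α)
    (h : ∀ y ∈ ys, f x y = g x y) :
    PySem.List.insertBy f x ys = PySem.List.insertBy g x ys := by
  induction ys with
  | nil => rfl
  | cons y ys ih =>
    simp only [PySem.List.insertBy]
    rw [h y (by simp)]
    by_cases hg : g x y = true
    · simp [hg]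
    · simp only [Bool.not_eq_true] at hg
      simp [hg, ih (fun z hz => h z (by simp [hz]))]

-- an insertion-sort fold only compares pairs of elements drawn from l ++ acc
theorem foldl_insertBy_congr {α : Type} (f g : α → α → Bool) :
    ∀ (l acc : List α), (∀ a b : α, a ∈ l → (b ∈ l ∨ b ∈ acc) → f a b = g a b) →
    l.foldl (fun acc x => PySem.List.insertBy f x acc) acc
      = l.foldl (fun acc x => PySem.List.insertBy g x acc) acc := by
  intro l
  induction l with
  | nil => intro acc _; rfl
  | cons x l ih =>
    intro acc h
    simp only [List.foldl_cons]
    rw [insertBy_congr_mem f g x acc (fun y hy => h x y (by simp) (Or.inr hy))]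
    exact ih _ (fun a b ha hb => h a b (by simp [ha]) (by
      rcases hb with hb | hb
      · exact Or.inl (by simp [hb])
      · rw [PySem.List.insertBy_mem_iff] at hb
        rcases hb with hb | hb
        · exact Or.inl (by simp [hb])
        · exact Or.inr hb))

-- on a list whose first components are distinct, Python's tuple sort is the sort by first component
theorem sorted2_eq_sorted_fst (l : List (Int × Int))
    (hinj : ∀ a ∈ l, ∀ b ∈ l, a.1 = b.1 → a = b) :
    PySem.List.sorted2 l (fun p => p.1) (fun p => p.2)
      = PySem.List.sorted l (fun p => p.1) := by
  rw [PySem.List.sorted_eq_foldl_insertBy]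
  show l.foldl (fun acc x => PySem.List.insertBy _ x acc) [] = _
  apply foldl_insertBy_congr
  intro a b ha hb
  rcases hb with hb | hb
  · by_cases hab : a.1 = b.1
    · have : a = b := hinj a ha b hb hab
      subst this
      simp
    · rcases lt_or_gt_of_ne hab with h1 | h1
      · simp [h1, not_lt.mpr (le_of_lt h1)]
      · simp [h1, not_lt.mpr (le_of_lt h1)]
  · simp at hb

-- dedup of a ≤-sorted list is strictly increasing
theorem ofList_pairwise_lt_of_sorted (l : List Int) (h : l.Pairwise (· ≤ ·)) :
    (PySem.Set.ofList l).Pairwise (· < ·) := by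
  induction l with
  | nil => simp [PySem.Set.ofList]
  | cons x xs ih =>
    rw [PySem.Set.ofList_cons]
    rcases List.pairwise_cons.mp h with ⟨hx, hxs⟩
    constructor
    · intro y hy
      simp only [PySem.Set.discard, List.mem_filter] at hy
      rcases hy with ⟨hy1, hy2⟩
      rw [PySem.Set.mem_ofList] at hy1
      exact lt_of_le_of_ne (hx y hy1) (Ne.symm (by simpa using hy2))
    · exact (ih hxs).sublist (List.filter_sublist)

theorem ofList_all_eq_append (x : Int) (r rest : List Int)
    (hr : ∀ a ∈ r, a = x) (hrest : x ∉ rest) :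
    (PySem.Set.ofList (r ++ rest)).discard x = PySem.Set.ofList rest := by
  induction r with
  | nil =>
    show (PySem.Set.ofList rest).discard x = _
    unfold PySem.Set.discard
    apply List.filter_eq_self.mpr
    intro a ha
    have hax : a ≠ x := fun hax => hrest (by rw [← hax]; exact (PySem.Set.mem_ofList _ _).mp ha)
    simp [hax]
  | cons a r' ih =>
    have hax : a = x := hr a (by simp)
    subst hax
    rw [List.cons_append, PySem.Set.ofList_cons]
    have ihh := ih (fun b hb => hr b (by simp [hb]))
    simp only [PySem.Set.discard] at ihh ⊢
    rw [List.filter_cons_of_neg (by simp), List.filter_filter]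
    simpa using ihh

-- a run-length scan of a ≤-sorted list lists each distinct value once, in order, with its count
theorem pvGroup_sorted (l : List Int) (h : l.Pairwise (· ≤ ·)) :
    pvGroup l = (PySem.Set.ofList l).map (fun k => (k, (l.count k : Int))) := by
  induction l using pvGroup.induct with
  | case1 => simp [pvGroup, PySem.Set.ofList]
  | case2 x xs ih =>
    rcases List.pairwise_cons.mp h with ⟨hx, hxs⟩
    have hsplit : xs.takeWhile (fun y => y == x) ++ xs.dropWhile (fun y => y == x) = xs :=
      List.takeWhile_append_dropWhile
    have hr : ∀ a ∈ xs.takeWhile (fun y => y == x), a = x := by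
      intro a ha
      simpa using List.mem_takeWhile_imp ha
    have hrestsorted : (xs.dropWhile (fun y => y == x)).Pairwise (· ≤ ·) :=
      hxs.sublist (List.dropWhile_sublist _)
    have hxrest : x ∉ xs.dropWhile (fun y => y == x) := by
      intro hmem
      cases hrest : xs.dropWhile (fun y => y == x) with
      | nil => rw [hrest] at hmem; simp at hmem
      | cons z t =>
        have hz : ¬ ((z == x) = true) := by
          have := List.head?_dropWhile_not (fun y => y == x) xs
          rw [hrest] at this
          simpa using this
        have hzx : z ≠ x := by simpa using hz
        have hzxs : z ∈ xs := (List.dropWhile_sublist _).subset (by rw [hrest]; simp)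
        have hxz : x ≤ z := hx z hzxs
        rw [hrest] at hmem
        rcases List.mem_cons.mp hmem with hmem | hmem
        · exact hzx hmem.symm
        · have : z ≤ x := by
            rw [hrest] at hrestsorted
            exact (List.pairwise_cons.mp hrestsorted).1 x hmem
          exact hzx (le_antisymm this hxz)
    have hcr : List.count x (xs.takeWhile (fun y => y == x)) = (xs.takeWhile (fun y => y == x)).length :=
      List.count_eq_length.mpr (fun b hb => (hr b hb).symm)
    have hcxs : List.count x xs = (xs.takeWhile (fun y => y == x)).length := by
      conv_lhs => rw [← hsplit]
      rw [List.count_append, hcr, List.count_eq_zero.mpr hxrest]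
      omega
    have hcount : List.count x (x :: xs) = 1 + (xs.takeWhile (fun y => y == x)).length := by
      rw [List.count_cons_self, hcxs]
      omega
    have hof : PySem.Set.ofList (x :: xs) = x :: PySem.Set.ofList (xs.dropWhile (fun y => y == x)) := by
      rw [PySem.Set.ofList_cons, ← hsplit, ofList_all_eq_append x _ _ hr hxrest, hsplit]
    rw [pvGroup, hof, List.map_cons, ih hrestsorted]
    congr 1
    · show _ = (x, (((x :: xs).count x : Nat) : Int))
      rw [hcount]
      push_cast
      ring_nf
    · apply List.map_congr_left
      intro k hk
      have hkrest : k ∈ xs.dropWhile (fun y => y == x) := (PySem.Set.mem_ofList _ _).mp hk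
      have hkx : k ≠ x := fun hkx => hxrest (hkx ▸ hkrest)
      have hck : List.count k (x :: xs) = List.count k (xs.dropWhile (fun y => y == x)) := by
        have : List.count k xs = List.count k (xs.dropWhile (fun y => y == x)) := by
          conv_lhs => rw [← hsplit]
          rw [List.count_append, List.count_eq_zero.mpr (fun hmem => hkx (hr k hmem)), Nat.zero_add]
        rw [List.count_cons_of_ne (Ne.symm hkx), this]
      rw [hck]

-- the unordered counting loop and the sorted run-length scan name the same (key, count) list
theorem groups_eq (factores : List Int) :
    PySem.List.sorted2
        (factores.foldl
          (fun d f => if d.contains f then d.modify f 0 (· + 1) else d.insert f (1 : Int))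
          PySem.Dict.empty).items (fun p => p.1) (fun p => p.2)
      = pvGroup (PySem.List.sorted factores (fun x => x)) := by
  have hc : factores.foldl
      (fun d f => if d.contains f then d.modify f 0 (· + 1) else d.insert f (1 : Int))
      PySem.Dict.empty = PySem.Dict.counter factores := by
    rw [PySem.Dict.counter_eq_foldl]
    apply PySem.List.foldl_congr_mem
    intro d f _
    by_cases hf : d.contains f = true
    · simp [hf]
    · simp only [Bool.not_eq_true] at hf
      simp [hf, PySem.Dict.modify, PySem.Dict.getD_of_not_contains d 0 hf]
  have hLsorted : (PySem.List.sorted factores (fun x => x)).Pairwise (· ≤ ·) :=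
    PySem.List.sorted_pairwise factores (fun x => x)
  have hofL : PySem.List.sorted (PySem.Set.ofList factores) (fun x => x)
      = PySem.Set.ofList (PySem.List.sorted factores (fun x => x)) := by
    apply PySem.List.sorted_eq_of_perm_of_pairwise_lt
    · rw [List.perm_ext_iff_of_nodup (PySem.Set.nodup_ofList _) (PySem.Set.nodup_ofList _)]
      intro a
      rw [PySem.Set.mem_ofList, PySem.Set.mem_ofList, PySem.List.mem_sorted]
    · exact ofList_pairwise_lt_of_sorted _ hLsorted
  rw [hc, pvGroup_sorted _ hLsorted, PySem.Dict.items_counter, ← hofL]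
  have hmapc : List.map (fun k => (k, (List.count k (PySem.List.sorted factores (fun x => x)) : Int)))
        (PySem.List.sorted (PySem.Set.ofList factores) (fun x => x))
      = List.map (fun k => (k, (List.count k factores : Int)))
        (PySem.List.sorted (PySem.Set.ofList factores) (fun x => x)) :=
    List.map_congr_left (fun k _ => by
      rw [(PySem.List.sorted_perm factores (fun x => x) false).count_eq k])
  rw [hmapc]
  rw [sorted2_eq_sorted_fst _ (by
    intro a ha b hb hfst
    rcases List.mem_map.mp ha with ⟨ka, _, rfl⟩
    rcases List.mem_map.mp hb with ⟨kb, _, rfl⟩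
    simp only at hfst
    simp [hfst])]
  apply PySem.List.sorted_eq_of_perm_of_pairwise_lt
  · exact List.Perm.map _ (PySem.List.sorted_perm _ _ _)
  · exact List.Pairwise.map _ (fun a b hab => hab)
      (PySem.List.sorted_ofList_pairwise_lt factores)

-- ===== VERDICT (by name: the statement is the Claim_ definition above) =====
theorem imprimir_factores_spec : Claim_equal_imprimir_factores := by
  intro n factores _
  unfold Spec_imprimir_factores imprimir_factores imprimir_factores_alt
  simp only
  rw [groups_eq]
  congr 1
  congr 1
  have hfold := PySem.List.foldl_congr_mem
    (pvGroup (PySem.List.sorted factores (fun x => x)))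
    (fun acc p =>
      if p.2 > 1 then acc ++ [PySem.Int.toStr p.1 ++ "^" ++ PySem.Int.toStr p.2]
      else acc ++ [PySem.Int.toStr p.1])
    (fun acc p =>
      acc ++ [if p.2 > 1 then PySem.Int.toStr p.1 ++ "^" ++ PySem.Int.toStr p.2
              else PySem.Int.toStr p.1])
    []
    (by intro acc p _; beta_reduce; split <;> rfl)
  rw [hfold, PySem.List.foldl_append_singleton_eq_map, List.nil_append]
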